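-- pv_equiv track=rewrite | github.com/Hetp29/CS210 | HW2/covid.py | fill_missing_cities
-- ===== SOURCE A (Python) =====
-- from collections import defaultdict
--
-- def fill_missing_cities(data):
--     province_to_cities = defaultdict(lambda: defaultdict(int))
--
--     for row in data:
--         province = row['province']
--         city = row['city']
--         if province and province != 'NaN' and city and city != 'NaN':
--             province_to_cities[province][city] += 1
--
--     province_to_most_common_city = {}
--     for province, cities in province_to_cities.items():
--         if cities:
--             max_count = max(cities.values())
--             most_common_cities = [city for city, count in cities.items() if count == max_count]
--             most_common_cities.sort()
--             province_to_most_common_city[province] = most_common_cities[0]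
--
--     for row in data:
--         province = row['province']
--         if row['city'] == 'NaN' and province in province_to_most_common_city:
--             row['city'] = province_to_most_common_city[province]
--
--     return data
-- ===== SOURCE B (Python) =====
-- def fill_missing_cities(data):
--     province_cities = {}
--     for row in data:
--         province = row['province']
--         city = row['city']
--         if province and province != 'NaN' and city and city != 'NaN':
--             province_cities.setdefault(province, []).append(city)
--
--     most_common = {}
--     for province, cities in province_cities.items():
--         cities.sort()
--         best_city = run_city = cities[0]
--         best_count = run_count = 1
--         for c in cities[1:]:
--             if c == run_city:
--                 run_count += 1
--             else:
--                 run_city = c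
--                 run_count = 1
--             if run_count > best_count:
--                 best_count = run_count
--                 best_city = run_city
--         most_common[province] = best_city
--
--     for row in data:
--         if row['city'] == 'NaN' and row['province'] in most_common:
--             row['city'] = most_common[row['province']]
--     return data
-- ===== Notes on version B (the rewrite author's own statement) =====
-- stated objective: alternative
-- what changed: Replaces the nested count-dict plus max/filter/sort tie-break with a dict of plain per-province city lists, each sorted once and scanned in a single run-length pass whose first strictly-longer run yields the alphabetically smallest most-common city.
import Mathlib
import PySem

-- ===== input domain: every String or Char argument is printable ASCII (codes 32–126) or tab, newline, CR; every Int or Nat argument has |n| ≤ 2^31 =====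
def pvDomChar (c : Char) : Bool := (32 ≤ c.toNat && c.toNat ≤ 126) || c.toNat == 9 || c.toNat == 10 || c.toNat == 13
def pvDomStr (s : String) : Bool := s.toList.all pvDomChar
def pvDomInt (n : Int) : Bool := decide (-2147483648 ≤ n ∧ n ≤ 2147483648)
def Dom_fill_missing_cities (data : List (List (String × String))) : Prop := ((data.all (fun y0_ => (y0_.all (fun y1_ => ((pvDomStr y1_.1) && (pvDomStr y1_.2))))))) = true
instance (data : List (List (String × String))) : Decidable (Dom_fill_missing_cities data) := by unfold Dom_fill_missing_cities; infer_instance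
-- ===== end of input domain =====

-- B replaces A's nested count-dict + max/filter/sort tie-break by per-province city lists,
-- each sorted once and scanned by runs (first strictly longer run wins). A mutates its rows in
-- place and returns them; the equivalence proved here is about the RETURN value only.


-- ===== PORT A =====
def fill_missing_cities (data : List (List (String × String))) : List (List (String × String)) :=
  -- province_to_cities: defaultdict(lambda: defaultdict(int)); +=1 on [province][city]
  let p2c : PySem.Dict String (PySem.Dict String Int) :=
    data.foldl (fun d row =>
      let province := (PySem.Dict.mk row).getD "province" ""
      let city := (PySem.Dict.mk row).getD "city" ""
      if province ≠ "" ∧ province ≠ "NaN" ∧ city ≠ "" ∧ city ≠ "NaN" then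
        d.insert province ((d.getD province PySem.Dict.empty).modify city 0 (· + 1))
      else d) PySem.Dict.empty
  -- province_to_most_common_city
  let p2m : PySem.Dict String String :=
    p2c.items.foldl (fun m pc =>
      if pc.2.size ≠ 0 then
        match PySem.List.max? pc.2.values (fun v => v) with
        | some maxCount =>
          match PySem.List.sorted ((pc.2.items.filter (fun q => q.2 == maxCount)).map (·.1)) (fun s => s) false with
          | mc :: _ => m.insert pc.1 mc
          | [] => m        -- unreachable (max is attained); totality guard
        | none => m        -- unreachable (values nonempty); totality guard
      else m) PySem.Dict.empty
  -- fill pass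
  data.map (fun row =>
    let r := PySem.Dict.mk row
    if r.getD "city" "" == "NaN" && p2m.contains (r.getD "province" "") then
      (r.insert "city" (p2m.getD (r.getD "province" "") "")).items
    else row)

-- ===== PORT B =====
-- loop body of Source B's run scan over the sorted city list; state = (best_city, best_count, run_city, run_count)
def pvStepB (st : String × Int × String × Int) (c : String) : String × Int × String × Int :=
  let (bc, bn, rc, rn) := st
  let (rc', rn') := if c == rc then (rc, rn + 1) else (c, (1 : Int))
  if rn' > bn then (rc', rn', rc', rn') else (bc, bn, rc', rn')

def fill_missing_cities_alt (data : List (List (String × String))) : List (List (String × String)) :=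
  -- province_cities: province -> list of its (valid) cities, via setdefault(..., []).append
  let p2l : PySem.Dict String (List String) :=
    data.foldl (fun d row =>
      let province := (PySem.Dict.mk row).getD "province" ""
      let city := (PySem.Dict.mk row).getD "city" ""
      if province ≠ "" ∧ province ≠ "NaN" ∧ city ≠ "" ∧ city ≠ "NaN" then
        d.modify province [] (· ++ [city])
      else d) PySem.Dict.empty
  -- most_common: sort each list, one run-length scan
  let p2m : PySem.Dict String String :=
    p2l.items.foldl (fun m pl =>
      match PySem.List.sorted pl.2 (fun s => s) false with
      | [] => m        -- unreachable (stored lists are nonempty); totality guard for cities[0]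
      | x :: rest => m.insert pl.1 (rest.foldl pvStepB (x, 1, x, 1)).1) PySem.Dict.empty
  -- fill pass
  data.map (fun row =>
    let r := PySem.Dict.mk row
    if r.getD "city" "" == "NaN" && p2m.contains (r.getD "province" "") then
      (r.insert "city" (p2m.getD (r.getD "province" "") "")).items
    else row)

-- ===== PRECONDITION & SPEC =====
-- Pre_ excludes exactly the rows-missing-a-key inputs on which Python A raises KeyError at row['province'] / row['city'].
def Pre_fill_missing_cities (data : List (List (String × String))) : Prop :=
  (data.all (fun row => (PySem.Dict.mk row).contains "province" && (PySem.Dict.mk row).contains "city")) = true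
instance (data : List (List (String × String))) : Decidable (Pre_fill_missing_cities data) := by unfold Pre_fill_missing_cities; infer_instance
def pvWitness_fill_missing_cities : (List (List (String × String))) :=
  [[("province", "ON"), ("city", "NaN")], [("province", "ON"), ("city", "Toronto")]]

def Spec_fill_missing_cities (data : List (List (String × String))) (out : List (List (String × String))) : Prop := out = fill_missing_cities_alt data
instance (data : List (List (String × String))) (out : List (List (String × String))) : Decidable (Spec_fill_missing_cities data out) := by unfold Spec_fill_missing_cities; infer_instance

-- ===== CLAIM (what is proved, stated in full; the proofs are below) =====
def Claim_equal_fill_missing_cities : Prop := ∀ (data : List (List (String × String))), Dom_fill_missing_cities data → Pre_fill_missing_cities data → Spec_fill_missing_cities data (fill_missing_cities data)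

-- ===== LEMMAS AND PROOFS =====

-- the value both second passes select for a city list l: the alphabetically least among the
-- cities of maximal multiplicity
def pvIsChoice (l : List String) (m : String) : Prop :=
  m ∈ l ∧ (∀ y ∈ l, l.count y ≤ l.count m) ∧ (∀ y ∈ l, l.count y = l.count m → m ≤ y)

theorem pvIsChoice_unique {l : List String} {m₁ m₂ : String}
    (h₁ : pvIsChoice l m₁) (h₂ : pvIsChoice l m₂) : m₁ = m₂ := by
  obtain ⟨hm₁, hmax₁, hmin₁⟩ := h₁
  obtain ⟨hm₂, hmax₂, hmin₂⟩ := h₂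
  have e : l.count m₂ = l.count m₁ := le_antisymm (hmax₁ _ hm₂) (hmax₂ _ hm₁)
  exact le_antisymm (hmin₁ _ hm₂ e) (hmin₂ _ hm₁ e.symm)

theorem pvIsChoice_perm {l l' : List String} {m : String} (hp : l.Perm l')
    (h : pvIsChoice l m) : pvIsChoice l' m := by
  obtain ⟨hm, hmax, hmin⟩ := h
  refine ⟨hp.mem_iff.mp hm, ?_, ?_⟩
  · intro y hy
    rw [← hp.count_eq, ← hp.count_eq]
    exact hmax y (hp.mem_iff.mpr hy)
  · intro y hy he
    rw [← hp.count_eq, ← hp.count_eq] at he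
    exact hmin y (hp.mem_iff.mpr hy) he

-- run-scan invariant and the rest of the proofs
theorem pv_cnt_snoc_ne {y c : String} (t : List String) (h : y ≠ c) :
    (t ++ [c]).count y = t.count y := by
  simp [List.count_append, List.count_eq_zero, h]

theorem pvScan_invariant (suffix : List String) : ∀ (t : List String) (bc rc : String),
    (t ++ suffix).Pairwise (· ≤ ·) →
    rc ∈ t → (∀ y ∈ t, y ≤ rc) →
    bc ∈ t → (∀ y ∈ t, t.count y ≤ t.count bc) →
    (∀ y ∈ t, t.count y = t.count bc → bc ≤ y) →
    pvIsChoice (t ++ suffix)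
      (suffix.foldl pvStepB (bc, (t.count bc : Int), rc, (t.count rc : Int))).1 := by
  induction suffix with
  | nil =>
    intro t bc rc _ _ _ hbc hmax hmin
    simp only [List.foldl_nil, List.append_nil]
    exact ⟨hbc, hmax, hmin⟩
  | cons c s ih =>
    intro t bc rc hpw hrc hrcmax hbc hmax hmin
    have hc : ∀ y ∈ t, y ≤ c := by
      intro y hy
      exact (List.pairwise_append.mp hpw).2.2 y hy c (by simp)
    have hpw' : ((t ++ [c]) ++ s).Pairwise (· ≤ ·) := by
      simpa [List.append_assoc] using hpw
    have hbcpos : 1 ≤ t.count bc := List.count_pos_iff.mpr hbc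
    have hteq : t ++ c :: s = (t ++ [c]) ++ s := by simp
    rw [hteq]
    simp only [List.foldl_cons]
    by_cases hceq : c = rc
    · -- run continues
      subst hceq
      have hcount_rc : (t ++ [c]).count c = t.count c + 1 := by simp
      by_cases hgt : ((t.count c : Int) + 1 > (t.count bc : Int))
      · have hstep : pvStepB (bc, (t.count bc : Int), c, (t.count c : Int)) c
            = (c, ((t ++ [c]).count c : Int), c, ((t ++ [c]).count c : Int)) := by
          simp [pvStepB, hgt, hcount_rc]
        rw [hstep]
        have hgt' : t.count bc < t.count c + 1 := by exact_mod_cast hgt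
        apply ih (t ++ [c]) c c hpw'
        · simp
        · intro y hy
          rcases List.mem_append.mp hy with h | h
          · exact hrcmax y h
          · simp at h; simp [h]
        · simp
        · intro y hy
          rcases List.mem_append.mp hy with h | h
          · by_cases hyc : y = c
            · subst hyc; omega
            · have : (t ++ [c]).count y = t.count y := pv_cnt_snoc_ne t hyc
              rw [this, hcount_rc]
              exact le_trans (hmax y h) (by omega)
          · simp at h; subst h; omega
        · intro y hy hcnt
          by_cases hyc : y = c
          · simp [hyc]
          · rcases List.mem_append.mp hy with h | h
            · have : (t ++ [c]).count y = t.count y := pv_cnt_snoc_ne t hyc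
              rw [this, hcount_rc] at hcnt
              have := hmax y h
              omega
            · simp at h; exact absurd h hyc
      · -- no update; bc ≠ c
        have hbcne : bc ≠ c := by
          intro h; subst h
          have : t.count bc = t.count bc := rfl
          push Not at hgt
          have : ((t.count bc : Int) + 1 ≤ (t.count bc : Int)) := hgt
          omega
        have hstep : pvStepB (bc, (t.count bc : Int), c, (t.count c : Int)) c
            = (bc, ((t ++ [c]).count bc : Int), c, ((t ++ [c]).count c : Int)) := by
          have h1 : (t ++ [c]).count bc = t.count bc := pv_cnt_snoc_ne t hbcne
          simp [pvStepB, hgt, hcount_rc, h1]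
        rw [hstep]
        push Not at hgt
        have hgt' : t.count c + 1 ≤ t.count bc := by exact_mod_cast hgt
        have h1 : (t ++ [c]).count bc = t.count bc := pv_cnt_snoc_ne t hbcne
        apply ih (t ++ [c]) bc c hpw'
        · simp
        · intro y hy
          rcases List.mem_append.mp hy with h | h
          · exact hrcmax y h
          · simp at h; simp [h]
        · simp [hbc]
        · intro y hy
          rw [h1]
          by_cases hyc : y = c
          · subst hyc; rw [hcount_rc]; omega
          · have : (t ++ [c]).count y = t.count y := pv_cnt_snoc_ne t hyc
            rw [this]
            rcases List.mem_append.mp hy with h | h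
            · exact hmax y h
            · simp at h; exact absurd h hyc
        · intro y hy hcnt
          rw [h1] at hcnt
          by_cases hyc : y = c
          · subst hyc; exact hc bc hbc
          · have : (t ++ [c]).count y = t.count y := pv_cnt_snoc_ne t hyc
            rw [this] at hcnt
            rcases List.mem_append.mp hy with h | h
            · exact hmin y h hcnt
            · simp at h; exact absurd h hyc
    · -- new run
      have hcnt0 : t.count c = 0 := by
        rw [List.count_eq_zero]
        intro hmem
        exact hceq (le_antisymm (hrcmax c hmem) (hc rc hrc))
      have hcount_c : (t ++ [c]).count c = 1 := by simp [List.count_append, hcnt0]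
      have hne : ¬ ((1 : Int) > (t.count bc : Int)) := by
        push Not; exact_mod_cast hbcpos
      have hbcne : bc ≠ c := by
        intro h; subst h; rw [List.count_eq_zero] at hcnt0; exact hcnt0 hbc
      have h1 : (t ++ [c]).count bc = t.count bc := pv_cnt_snoc_ne t hbcne
      have hstep : pvStepB (bc, (t.count bc : Int), rc, (t.count rc : Int)) c
          = (bc, ((t ++ [c]).count bc : Int), c, ((t ++ [c]).count c : Int)) := by
        have hb : (c == rc) = false := by simp [hceq]
        simp [pvStepB, hb, hne, hcount_c, h1]
      rw [hstep]
      apply ih (t ++ [c]) bc c hpw'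
      · simp
      · intro y hy
        rcases List.mem_append.mp hy with h | h
        · exact hc y h
        · simp at h; simp [h]
      · simp [hbc]
      · intro y hy
        rw [h1]
        by_cases hyc : y = c
        · subst hyc; rw [hcount_c]; omega
        · have : (t ++ [c]).count y = t.count y := pv_cnt_snoc_ne t hyc
          rw [this]
          rcases List.mem_append.mp hy with h | h
          · exact hmax y h
          · simp at h; exact absurd h hyc
      · intro y hy hcnt
        rw [h1] at hcnt
        by_cases hyc : y = c
        · subst hyc; exact hc bc hbc
        · have : (t ++ [c]).count y = t.count y := pv_cnt_snoc_ne t hyc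
          rw [this] at hcnt
          rcases List.mem_append.mp hy with h | h
          · exact hmin y h hcnt
          · simp at h; exact absurd h hyc

-- B's scan on a sorted nonempty list computes the choice
theorem pvScan_choice {l : List String} {x : String} {rest : List String}
    (h : PySem.List.sorted l (fun s => s) false = x :: rest) :
    pvIsChoice l (rest.foldl pvStepB (x, 1, x, 1)).1 := by
  have hperm : (PySem.List.sorted l (fun s => s) false).Perm l := PySem.List.sorted_perm l _ false
  rw [h] at hperm
  have hpw : (([x] ++ rest)).Pairwise (fun a b => a ≤ b) := by
    have := PySem.List.sorted_pairwise l (fun s => s)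
    rw [h] at this
    simpa using this
  have hinv := pvScan_invariant rest [x] x x hpw (by simp) (by simp) (by simp) (by simp) (by simp)
  have hcnt : (([x] : List String).count x : Int) = 1 := by simp
  rw [hcnt] at hinv
  exact pvIsChoice_perm (by simpa using hperm) hinv

-- A's max/filter/sort/head on counter l computes the choice (l nonempty)
theorem pvA_choice {l : List String} (hl : l ≠ []) :
    ∃ maxCount mc mcs,
      PySem.List.max? (PySem.Dict.counter l : PySem.Dict String Int).values (fun v => v) = some maxCount ∧
      PySem.List.sorted (((PySem.Dict.counter l : PySem.Dict String Int).items.filter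
          (fun q => q.2 == maxCount)).map (·.1)) (fun s => s) false = mc :: mcs ∧
      pvIsChoice l mc := by
  have hitems : (PySem.Dict.counter l : PySem.Dict String Int).items
      = (PySem.Set.ofList l).map (fun k => (k, (l.count k : Int))) := PySem.Dict.items_counter l
  have hvals : (PySem.Dict.counter l : PySem.Dict String Int).values
      = (PySem.Set.ofList l).map (fun k => (l.count k : Int)) := by
    simp only [PySem.Dict.values, hitems, List.map_map]
    rfl
  obtain ⟨a, ha⟩ := List.exists_mem_of_ne_nil l hl
  have haS : a ∈ PySem.Set.ofList l := (PySem.Set.mem_ofList l a).mpr ha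
  cases hmax : PySem.List.max? (PySem.Dict.counter l : PySem.Dict String Int).values (fun v => v) with
  | none =>
    exfalso
    rw [PySem.List.max?_eq_none_iff, hvals, List.map_eq_nil_iff] at hmax
    rw [hmax] at haS
    exact (List.not_mem_nil).elim haS
  | some M =>
    have hMmem := PySem.List.max?_mem hmax
    rw [hvals] at hMmem
    obtain ⟨k0, hk0, hk0e⟩ := List.mem_map.mp hMmem
    have hMmax : ∀ v ∈ (PySem.Dict.counter l : PySem.Dict String Int).values, v ≤ M :=
      PySem.List.max?_isMax hmax
    have hfm : (((PySem.Dict.counter l : PySem.Dict String Int).items.filter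
          (fun q => q.2 == M)).map (·.1))
        = (PySem.Set.ofList l).filter (fun k => ((l.count k : Int) == M)) := by
      rw [hitems, List.filter_map, List.map_map]
      simp [Function.comp_def]
    have hk0F : k0 ∈ (PySem.Set.ofList l).filter (fun k => ((l.count k : Int) == M)) :=
      List.mem_filter.mpr ⟨hk0, by simp [hk0e]⟩
    have hFne : (PySem.Set.ofList l).filter (fun k => ((l.count k : Int) == M)) ≠ [] := by
      intro h
      rw [h] at hk0F
      exact (List.not_mem_nil).elim hk0F
    cases hs : PySem.List.sorted ((PySem.Set.ofList l).filter (fun k => ((l.count k : Int) == M)))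
        (fun s => s) false with
    | nil => exact absurd ((PySem.List.sorted_eq_nil_iff _ _ _).mp hs) hFne
    | cons mc mcs =>
      have hmcF : mc ∈ (PySem.Set.ofList l).filter (fun k => ((l.count k : Int) == M)) := by
        rw [← PySem.List.mem_sorted _ (fun s : String => s) false, hs]
        simp
      obtain ⟨hmcS, hmcM⟩ := List.mem_filter.mp hmcF
      have hmcMe : (l.count mc : Int) = M := by simpa using hmcM
      refine ⟨M, mc, mcs, rfl, by rw [hfm]; exact hs, ?_, ?_, ?_⟩
      · exact (PySem.Set.mem_ofList l mc).mp hmcS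
      · intro y hy
        have : (l.count y : Int) ∈ (PySem.Dict.counter l : PySem.Dict String Int).values := by
          rw [hvals]
          exact List.mem_map.mpr ⟨y, (PySem.Set.mem_ofList l y).mpr hy, rfl⟩
        have h1 := hMmax _ this
        rw [← hmcMe] at h1
        exact_mod_cast h1
      · intro y hy hcy
        have hyF : y ∈ (PySem.Set.ofList l).filter (fun k => ((l.count k : Int) == M)) :=
          List.mem_filter.mpr ⟨(PySem.Set.mem_ofList l y).mpr hy, by
            simp [hcy, hmcMe]⟩
        exact PySem.List.key_head_sorted_le _ (fun s : String => s) hs y hyF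

-- first-pass correspondence: A's counter dict is B's list dict, counted
def pvMapDict (d : PySem.Dict String (List String)) : PySem.Dict String (PySem.Dict String Int) :=
  PySem.Dict.mk (d.items.map (fun q => (q.1, PySem.Dict.counter q.2)))

theorem pvMapDict_getD (d : PySem.Dict String (List String)) (p : String) :
    (pvMapDict d).getD p PySem.Dict.empty = PySem.Dict.counter (d.getD p []) := by
  unfold pvMapDict PySem.Dict.getD PySem.Dict.get?
  rw [show (PySem.Dict.mk (d.items.map (fun q => (q.1, PySem.Dict.counter q.2)))).items
      = d.items.map (fun q => (q.1, PySem.Dict.counter q.2)) from rfl, List.find?_map]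
  rw [show ((fun (q : String × PySem.Dict String Int) => q.1 == p) ∘
      (fun q : String × List String => (q.1, PySem.Dict.counter q.2)))
      = (fun q : String × List String => q.1 == p) from rfl]
  cases hf : d.items.find? (fun q => q.1 == p) with
  | none => rfl
  | some q => rfl

theorem pvMapDict_contains (d : PySem.Dict String (List String)) (p : String) :
    (pvMapDict d).contains p = d.contains p := by
  unfold pvMapDict PySem.Dict.contains
  rw [show (PySem.Dict.mk (d.items.map (fun q => (q.1, PySem.Dict.counter q.2)))).items
      = d.items.map (fun q => (q.1, PySem.Dict.counter q.2)) from rfl, List.any_map]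
  rfl

theorem pvMapDict_insert (d : PySem.Dict String (List String)) (p : String) (v : List String) :
    pvMapDict (d.insert p v) = (pvMapDict d).insert p (PySem.Dict.counter v) := by
  have hc := pvMapDict_contains d p
  unfold PySem.Dict.insert
  rw [hc]
  by_cases h : d.contains p = true
  · simp only [h, if_pos]
    unfold pvMapDict
    congr 1
    show (d.items.map (fun q => if (q.1 == p) = true then (p, v) else q)).map
        (fun q => (q.1, PySem.Dict.counter q.2))
      = (d.items.map (fun q => (q.1, PySem.Dict.counter q.2))).map
        (fun q => if (q.1 == p) = true then (p, PySem.Dict.counter v) else q)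
    rw [List.map_map, List.map_map]
    apply List.map_congr_left
    intro q _
    by_cases hq : q.1 = p <;> simp [hq]
  · simp only [h, if_neg, Bool.false_eq_true, not_false_iff]
    unfold pvMapDict
    congr 1
    show ((d.items ++ [(p, v)]).map (fun q => (q.1, PySem.Dict.counter q.2)))
      = (d.items.map (fun q => (q.1, PySem.Dict.counter q.2))) ++ [(p, PySem.Dict.counter v)]
    rw [List.map_append]
    rfl

-- second pass: A's per-province step equals B's, pointwise over corresponding items
theorem pvFold2 (LB : List (String × List String)) : ∀ (m : PySem.Dict String String),
    (∀ q ∈ LB, q.2 ≠ []) →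
    (LB.map (fun q => (q.1, PySem.Dict.counter q.2))).foldl (fun m pc =>
      if pc.2.size ≠ 0 then
        match PySem.List.max? pc.2.values (fun v => v) with
        | some maxCount =>
          match PySem.List.sorted ((pc.2.items.filter (fun q => q.2 == maxCount)).map (·.1)) (fun s => s) false with
          | mc :: _ => m.insert pc.1 mc
          | [] => m
        | none => m
      else m) m
    = LB.foldl (fun m pl =>
      match PySem.List.sorted pl.2 (fun s => s) false with
      | [] => m
      | x :: rest => m.insert pl.1 (rest.foldl pvStepB (x, 1, x, 1)).1) m := by
  induction LB with
  | nil => intro m _; rfl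
  | cons q LB ih =>
    intro m hne
    have hq2 : q.2 ≠ [] := hne q (by simp)
    simp only [List.map_cons, List.foldl_cons]
    have hstep : (if (PySem.Dict.counter q.2 : PySem.Dict String Int).size ≠ 0 then
        match PySem.List.max? (PySem.Dict.counter q.2 : PySem.Dict String Int).values (fun v => v) with
        | some maxCount =>
          match PySem.List.sorted (((PySem.Dict.counter q.2 : PySem.Dict String Int).items.filter (fun q => q.2 == maxCount)).map (·.1)) (fun s => s) false with
          | mc :: _ => m.insert q.1 mc
          | [] => m
        | none => m
      else m)
      = (match PySem.List.sorted q.2 (fun s => s) false with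
        | [] => m
        | x :: rest => m.insert q.1 (rest.foldl pvStepB (x, 1, x, 1)).1) := by
      obtain ⟨M, mc, mcs, hmax, hsort, hch⟩ := pvA_choice hq2
      have hsz : (PySem.Dict.counter q.2 : PySem.Dict String Int).size ≠ 0 := by
        unfold PySem.Dict.size
        rw [PySem.Dict.items_counter, List.length_map]
        intro h
        rw [List.length_eq_zero_iff] at h
        obtain ⟨a, ha⟩ := List.exists_mem_of_ne_nil q.2 hq2
        have := (PySem.Set.mem_ofList q.2 a).mpr ha
        rw [h] at this
        exact (List.not_mem_nil).elim this
      cases hs : PySem.List.sorted q.2 (fun s => s) false with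
      | nil => exact absurd ((PySem.List.sorted_eq_nil_iff _ _ _).mp hs) hq2
      | cons x rest =>
        have hchB := pvScan_choice hs
        rw [if_pos hsz, hmax]
        dsimp only
        rw [hsort]
        dsimp only
        rw [pvIsChoice_unique hch hchB]
    rw [hstep]
    exact ih _ (fun q hq => hne q (by simp [hq]))

-- first pass: A's fold is the pvMapDict image of B's fold, and B stores only nonempty lists
theorem pvFold1 (data : List (List (String × String))) : ∀ (d : PySem.Dict String (List String)),
    (∀ q ∈ d.items, q.2 ≠ []) →
    (data.foldl (fun d row =>
      let province := (PySem.Dict.mk row).getD "province" ""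
      let city := (PySem.Dict.mk row).getD "city" ""
      if province ≠ "" ∧ province ≠ "NaN" ∧ city ≠ "" ∧ city ≠ "NaN" then
        d.insert province ((d.getD province PySem.Dict.empty).modify city 0 (· + 1))
      else d) (pvMapDict d)
    = pvMapDict (data.foldl (fun d row =>
      let province := (PySem.Dict.mk row).getD "province" ""
      let city := (PySem.Dict.mk row).getD "city" ""
      if province ≠ "" ∧ province ≠ "NaN" ∧ city ≠ "" ∧ city ≠ "NaN" then
        d.modify province [] (· ++ [city])
      else d) d))
    ∧ (∀ q ∈ (data.foldl (fun d row =>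
      let province := (PySem.Dict.mk row).getD "province" ""
      let city := (PySem.Dict.mk row).getD "city" ""
      if province ≠ "" ∧ province ≠ "NaN" ∧ city ≠ "" ∧ city ≠ "NaN" then
        d.modify province [] (· ++ [city])
      else d) d).items, q.2 ≠ []) := by
  induction data with
  | nil => intro d hd; exact ⟨rfl, hd⟩
  | cons row data ih =>
    intro d hd
    simp only [List.foldl_cons]
    by_cases hg : (PySem.Dict.mk row).getD "province" "" ≠ "" ∧ (PySem.Dict.mk row).getD "province" "" ≠ "NaN" ∧
        (PySem.Dict.mk row).getD "city" "" ≠ "" ∧ (PySem.Dict.mk row).getD "city" "" ≠ "NaN"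
    · rw [if_pos hg, if_pos hg]
      have hA : (pvMapDict d).insert ((PySem.Dict.mk row).getD "province" "")
            (((pvMapDict d).getD ((PySem.Dict.mk row).getD "province" "") PySem.Dict.empty).modify
              ((PySem.Dict.mk row).getD "city" "") 0 (· + 1))
          = pvMapDict (d.modify ((PySem.Dict.mk row).getD "province" "") [] (· ++ [(PySem.Dict.mk row).getD "city" ""])) := by
        rw [pvMapDict_getD, ← PySem.Dict.counter_append_singleton]
        rw [show d.modify ((PySem.Dict.mk row).getD "province" "") [] (· ++ [(PySem.Dict.mk row).getD "city" ""])
            = d.insert ((PySem.Dict.mk row).getD "province" "")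
                (d.getD ((PySem.Dict.mk row).getD "province" "") [] ++ [(PySem.Dict.mk row).getD "city" ""]) from rfl]
        rw [pvMapDict_insert]
      rw [hA]
      apply ih
      intro q hq
      rcases (PySem.Dict.mem_items_insert _ _ _ q).mp hq with h | h
      · rw [h]
        simp
      · exact hd q h.1
    · rw [if_neg hg, if_neg hg]
      exact ih d hd

-- ===== VERDICT (by name: the statement is the Claim_ definition above) =====
theorem fill_missing_cities_spec : Claim_equal_fill_missing_cities := by
  intro data _ _
  unfold Spec_fill_missing_cities fill_missing_cities fill_missing_cities_alt
  dsimp only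
  obtain ⟨h1, h2⟩ := pvFold1 data PySem.Dict.empty (by intro q hq; exact (List.not_mem_nil).elim hq)
  rw [show (PySem.Dict.empty : PySem.Dict String (PySem.Dict String Int)) = pvMapDict PySem.Dict.empty from rfl]
  rw [h1]
  rw [show (pvMapDict (data.foldl (fun d row =>
      let province := (PySem.Dict.mk row).getD "province" ""
      let city := (PySem.Dict.mk row).getD "city" ""
      if province ≠ "" ∧ province ≠ "NaN" ∧ city ≠ "" ∧ city ≠ "NaN" then
        d.modify province [] (· ++ [city])
      else d) PySem.Dict.empty)).items
    = (data.foldl (fun d row =>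
      let province := (PySem.Dict.mk row).getD "province" ""
      let city := (PySem.Dict.mk row).getD "city" ""
      if province ≠ "" ∧ province ≠ "NaN" ∧ city ≠ "" ∧ city ≠ "NaN" then
        d.modify province [] (· ++ [city])
      else d) PySem.Dict.empty).items.map (fun q => (q.1, PySem.Dict.counter q.2)) from rfl]
  rw [pvFold2 _ _ h2]
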